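-- pv_equiv track=rewrite | github.com/mwooll/dice | Dice.py | decompose_string
-- ===== SOURCE A (Python) =====
-- def decompose_string(string):
--     pieces = {}
--     for letter in string:
--         if letter not in pieces:
--             pieces[letter] = 1
--         else:
--             pieces[letter] += 1
--
--     sorted_letters = sorted(pieces.keys())
--     decomposed = ""
--     for letter in sorted_letters:
--         onset = f"{pieces[letter]}*" if pieces[letter]>1 else ""
--         decomposed += onset + f"{letter} + "
--     decomposed = decomposed[:-3]
--     return decomposed
-- ===== SOURCE B (Python) =====
-- def decompose_string(string):
--     chars = sorted(string)
--     terms = []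
--     while chars:
--         c = chars[0]
--         run = 1
--         while run < len(chars) and chars[run] == c:
--             run += 1
--         terms.append((f"{run}*" if run > 1 else "") + c)
--         chars = chars[run:]
--     return " + ".join(terms)
-- ===== Notes on version B (the rewrite author's own statement) =====
-- stated objective: alternative
-- what changed: Replaces dict-counting plus key-sort plus build-then-chop string concatenation with sorting the whole character list once, scanning consecutive equal runs to get each letter's count, and joining the terms with the separator.
import Mathlib
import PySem

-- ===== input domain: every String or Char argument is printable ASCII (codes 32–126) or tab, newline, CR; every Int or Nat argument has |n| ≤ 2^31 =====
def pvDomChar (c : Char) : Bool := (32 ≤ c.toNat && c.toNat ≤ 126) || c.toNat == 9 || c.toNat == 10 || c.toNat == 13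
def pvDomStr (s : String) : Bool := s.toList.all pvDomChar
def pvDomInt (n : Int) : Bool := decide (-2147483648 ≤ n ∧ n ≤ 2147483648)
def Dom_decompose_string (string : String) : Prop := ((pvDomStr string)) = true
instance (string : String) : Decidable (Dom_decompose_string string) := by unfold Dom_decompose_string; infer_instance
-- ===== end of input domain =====

-- B rewrites A's dict-count + key-sort + build-then-chop concatenation as one full sort, a run scan, and a separator join; same return value for all strings.

-- ===== PORT A =====
-- the counting loop: if letter not in pieces: pieces[letter] = 1 else: pieces[letter] += 1
def aPieces (l : List Char) : PySem.Dict Char Int :=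
  l.foldl (fun d c => if d.contains c = false then d.insert c 1 else d.modify c 0 (· + 1)) PySem.Dict.empty

-- the output loop on the char-list side (pieces[letter] is always a present key, read with getD)
def aBuild (d : PySem.Dict Char Int) (letters : List Char) : List Char :=
  letters.foldl (fun acc c =>
    acc ++ (if d.getD c 0 > 1 then PySem.Int.toChars (d.getD c 0) ++ ['*'] else []) ++ [c] ++ [' ', '+', ' ']) []

def decompose_string (string : String) : String :=
  let pieces := aPieces string.toList
  let sorted_letters := PySem.List.sorted pieces.keys (fun x => x) false
  let decomposed := aBuild pieces sorted_letters
  String.ofList (PySem.List.slice decomposed none (some (-3)))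

-- ===== PORT B =====
-- one run of equal characters at the front of the sorted list becomes one term
def bTerms : List Char → List (List Char)
  | [] => []
  | c :: rest =>
    let run := (rest.takeWhile (· == c)).length + 1
    ((if run > 1 then PySem.Int.toChars (run : Int) ++ ['*'] else []) ++ [c]) ::
      bTerms (rest.dropWhile (· == c))
  termination_by l => l.length
  decreasing_by
    simp only [List.length_cons]
    exact Nat.lt_succ_of_le (List.length_dropWhile_le _ _)

def decompose_string_alt (string : String) : String :=
  String.ofList (PySem.Chars.join [' ', '+', ' '] (bTerms (PySem.List.sorted string.toList (fun x => x) false)))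

-- ===== PRECONDITION & SPEC =====
def Spec_decompose_string (string : String) (out : String) : Prop := out = decompose_string_alt string
instance (string : String) (out : String) : Decidable (Spec_decompose_string string out) := by unfold Spec_decompose_string; infer_instance

-- ===== CLAIM (what is proved, stated in full; the proofs are below) =====
def Claim_equal_decompose_string : Prop := ∀ (string : String), Dom_decompose_string string → Spec_decompose_string string (decompose_string string)

-- ===== LEMMAS AND PROOFS =====

-- A's counting loop builds Counter(l)
theorem aPieces_eq_counter (l : List Char) : aPieces l = PySem.Dict.counter l := by
  rw [PySem.Dict.counter_eq_foldl]
  unfold aPieces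
  congr 1
  funext d c
  by_cases h : d.contains c = false
  · rw [if_pos h]
    simp [PySem.Dict.modify, PySem.Dict.getD_of_not_contains d (0 : Int) h]
  · rw [if_neg h]

-- A's output loop flattens the per-letter pieces
theorem aBuild_eq (d : PySem.Dict Char Int) (K : List Char) :
    aBuild d K = K.flatMap (fun c =>
      (if d.getD c 0 > 1 then PySem.Int.toChars (d.getD c 0) ++ ['*'] else []) ++ ([c] ++ [' ', '+', ' '])) := by
  unfold aBuild
  simp only [List.append_assoc]
  rw [PySem.List.foldl_append_eq_flatMap]
  simp

theorem length_filter_beq (c : Char) (l : List Char) : (l.filter (· == c)).length = l.count c := by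
  induction l with
  | nil => rfl
  | cons x r ih => by_cases h : x = c <;> simp [h, ih]

-- on a sorted tail whose elements are all ≥ c, the run at the front is exactly the filter
theorem takeWhile_filter_sorted (c : Char) (rest : List Char)
    (hs : rest.Pairwise (· ≤ ·)) (hge : ∀ x ∈ rest, c ≤ x) :
    rest.takeWhile (· == c) = rest.filter (· == c) ∧
    rest.dropWhile (· == c) = rest.filter (fun x => !(x == c)) := by
  induction rest with
  | nil => simp
  | cons x r ih =>
    have hr : r.Pairwise (· ≤ ·) := (List.pairwise_cons.mp hs).2
    have hxr : ∀ y ∈ r, x ≤ y := (List.pairwise_cons.mp hs).1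
    by_cases hx : x = c
    · subst hx
      have hge' : ∀ y ∈ r, x ≤ y := hxr
      obtain ⟨h1, h2⟩ := ih hr hge'
      simp [h1, h2]
    · have hcx : c < x := lt_of_le_of_ne (hge x (by simp)) (Ne.symm hx)
      have hgt : ∀ y ∈ x :: r, c < y := by
        intro y hy
        rcases List.mem_cons.mp hy with h | h
        · exact h ▸ hcx
        · exact lt_of_lt_of_le hcx (hxr y h)
      have hne : ∀ y ∈ x :: r, (y == c) = false := by
        intro y hy
        exact beq_eq_false_iff_ne.mpr (fun h => absurd h.symm (ne_of_lt (hgt y hy)))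
      constructor
      · rw [List.takeWhile_cons_of_neg (by simp [hne x (by simp)])]
        rw [List.filter_eq_nil_iff.mpr (by intro y hy; simp [hne y hy])]
      · rw [List.dropWhile_cons_of_neg (by simp [hne x (by simp)])]
        rw [List.filter_eq_self.mpr (by intro y hy; simp [hne y hy])]

-- PySem.Set.ofList commutes with filter
theorem ofList_filter (p : Char → Bool) (xs : List Char) :
    (PySem.Set.ofList xs).filter p = PySem.Set.ofList (xs.filter p) := by
  induction xs with
  | nil => simp [PySem.Set.ofList_nil]
  | cons x r ih =>
    by_cases hp : p x = true
    · rw [PySem.Set.ofList_cons, List.filter_cons_of_pos hp]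
      conv_rhs => rw [List.filter_cons_of_pos hp, PySem.Set.ofList_cons]
      rw [← ih]
      simp only [PySem.Set.discard, List.filter_filter]
      congr 1
      apply List.filter_congr
      intro y _
      cases hpy : p y <;> cases hyx : (y == x) <;> simp [*]
    · rw [PySem.Set.ofList_cons, List.filter_cons_of_neg (by simpa using hp)]
      conv_rhs => rw [List.filter_cons_of_neg (by simpa using hp)]
      rw [← ih]
      simp only [PySem.Set.discard, List.filter_filter]
      apply List.filter_congr
      intro y hy
      cases hpy : p y with
      | false => simp
      | true =>
        have hyx : (y == x) = false := beq_eq_false_iff_ne.mpr (fun h => hp (h ▸ hpy))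
        simp [hyx]

-- main characterisation of B's term list on a sorted list
theorem bTerms_sorted (s : List Char) : s.Pairwise (· ≤ ·) →
    bTerms s = (PySem.Set.ofList s).map
      (fun c => (if ((s.count c : Int)) > 1 then PySem.Int.toChars (s.count c) ++ ['*'] else []) ++ [c]) ∧
    (PySem.Set.ofList s).Pairwise (· < ·) := by
  induction s using bTerms.induct with
  | case1 => intro _; simp [bTerms, PySem.Set.ofList_nil]
  | case2 c rest ih =>
    intro hs
    have hr : rest.Pairwise (· ≤ ·) := (List.pairwise_cons.mp hs).2
    have hge : ∀ x ∈ rest, c ≤ x := (List.pairwise_cons.mp hs).1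
    obtain ⟨ht, hd⟩ := takeWhile_filter_sorted c rest hr hge
    have hds : (rest.dropWhile (· == c)).Pairwise (· ≤ ·) := by
      rw [hd]; exact hr.filter _
    obtain ⟨ihm, ihp⟩ := ih hds
    have hrun : (rest.takeWhile (· == c)).length + 1 = (c :: rest).count c := by
      rw [ht, length_filter_beq, List.count_cons_self]
    have hofl : PySem.Set.ofList (c :: rest) = c :: PySem.Set.ofList (rest.dropWhile (· == c)) := by
      rw [PySem.Set.ofList_cons]
      congr 1
      rw [hd]
      show (PySem.Set.ofList rest).filter (fun y => !(y == c)) = _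
      rw [ofList_filter]
    have hmemd : ∀ x ∈ PySem.Set.ofList (rest.dropWhile (· == c)), c < x := by
      intro x hx
      have hxd : x ∈ rest.dropWhile (· == c) := (PySem.Set.mem_ofList _ _).mp hx
      rw [hd] at hxd
      obtain ⟨hxr, hne⟩ := List.mem_filter.mp hxd
      refine lt_of_le_of_ne (hge x hxr) (fun h => ?_)
      simp [← h] at hne
    have hcnt_tail : ∀ x ∈ PySem.Set.ofList (rest.dropWhile (· == c)),
        (c :: rest).count x = (rest.dropWhile (· == c)).count x := by
      intro x hx
      have hxc : x ≠ c := ne_of_gt (hmemd x hx)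
      have hcc : List.count x (c :: rest) = List.count x rest := by
        simp [Ne.symm hxc]
      rw [hcc]
      conv_lhs => rw [← List.takeWhile_append_dropWhile (p := (· == c)) (l := rest)]
      rw [List.count_append]
      have hz : (rest.takeWhile (· == c)).count x = 0 := by
        rw [List.count_eq_zero]
        intro hmem
        rw [ht] at hmem
        exact hxc (by simpa using (List.mem_filter.mp hmem).2)
      omega
    constructor
    · simp only [bTerms]
      rw [hofl, List.map_cons]
      congr 1
      · rw [← hrun]
        by_cases h1 : 0 < (rest.takeWhile (· == c)).length
        · have h2 : (rest.takeWhile (· == c)).length + 1 > 1 := by omega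
          simp [h1, h2]
        · have h2 : ¬((rest.takeWhile (· == c)).length + 1 > 1) := by omega
          simp [h1, h2]
      · rw [ihm]
        apply List.map_congr_left
        intro x hx
        rw [hcnt_tail x hx]
    · rw [hofl]
      exact List.pairwise_cons.mpr ⟨hmemd, ihp⟩

-- chopping the trailing " + " off the flattened terms is joining with " + "
theorem take_flatMap_join (A : Char → List Char) : ∀ (K : List Char),
    ((K.flatMap (fun c => A c ++ ([c] ++ [' ', '+', ' ']))).take
      ((K.flatMap (fun c => A c ++ ([c] ++ [' ', '+', ' ']))).length - 3)) =
    PySem.Chars.join [' ', '+', ' '] (K.map (fun c => A c ++ [c]))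
  | [] => by simp [PySem.Chars.join_nil]
  | [c] => by
      simp only [List.flatMap_cons, List.flatMap_nil, List.append_nil, List.map_cons, List.map_nil]
      rw [PySem.Chars.join_singleton, ← List.append_assoc]
      have h : ((A c ++ [c]) ++ [' ', '+', ' ']).length - 3 = (A c ++ [c]).length := by
        simp
      rw [h, List.take_append, List.take_length, Nat.sub_self, List.take_zero, List.append_nil]
  | c :: c' :: K => by
      have ih := take_flatMap_join A (c' :: K)
      have h3 : 3 ≤ ((c' :: K).flatMap (fun c => A c ++ ([c] ++ [' ', '+', ' ']))).length := by
        rw [List.flatMap_cons]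
        simp only [List.length_append, List.length_cons, List.length_nil]
        omega
      generalize hF : (c' :: K).flatMap (fun c => A c ++ ([c] ++ [' ', '+', ' '])) = F at ih h3
      rw [List.flatMap_cons, hF]
      have harith : (A c ++ ([c] ++ [' ', '+', ' ']) ++ F).length - 3
          = (A c ++ ([c] ++ [' ', '+', ' '])).length + (F.length - 3) := by
        simp only [List.length_append, List.length_cons, List.length_nil]
        omega
      rw [harith, List.take_append, List.take_of_length_le (Nat.le_add_right _ _),
        Nat.add_sub_cancel_left, ih]
      conv_rhs => rw [List.map_cons, List.map_cons, PySem.Chars.join_cons_cons]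
      rw [List.map_cons]
      simp [List.append_assoc]

-- ===== VERDICT (by name: the statement is the Claim_ definition above) =====
theorem decompose_string_spec : Claim_equal_decompose_string := by
  unfold Claim_equal_decompose_string Spec_decompose_string
  intro s _
  simp only [decompose_string, decompose_string_alt]
  rw [aPieces_eq_counter, PySem.Dict.keys_counter, aBuild_eq]
  rw [PySem.List.slice_to_neg_ofNat _ 3 (by norm_num), take_flatMap_join]
  congr 1
  obtain ⟨hmap, hpw⟩ := bTerms_sorted (PySem.List.sorted s.toList (fun x => x) false)
    (PySem.List.sorted_pairwise s.toList (fun x => x))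
  rw [hmap]
  have hperm : (PySem.Set.ofList (PySem.List.sorted s.toList (fun x => x) false)).Perm
      (PySem.Set.ofList s.toList) := by
    rw [List.perm_ext_iff_of_nodup (PySem.Set.nodup_ofList _) (PySem.Set.nodup_ofList _)]
    intro a
    simp [PySem.Set.mem_ofList, PySem.List.mem_sorted]
  rw [PySem.List.sorted_eq_of_perm_of_pairwise_lt _ _ _ hperm hpw]
  congr 1
  apply List.map_congr_left
  intro x hx
  have hcnt : (PySem.List.sorted s.toList (fun x => x) false).count x = s.toList.count x :=
    (PySem.List.sorted_perm s.toList (fun x => x) false).count_eq x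
  rw [PySem.Dict.getD_counter, hcnt]
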